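-- pv_equiv track=rewrite | github.com/MrBrantCode/unitest_baseline | mut_generate/mist_train_taco/taco_6330/solution.py | max_p_mod
-- ===== SOURCE A (Python) =====
-- from functools import reduce
-- from itertools import combinations
-- from operator import mul
--
-- def max_p_mod(test_cases, mod=1000000007):
--     def egcd(a, b):
--         if a == 0:
--             return (b, 0, 1)
--         else:
--             g, y, x = egcd(b % a, a)
--             return (g, x - (b // a) * y, y)
--
--     def modinv(a):
--         g, x, y = egcd(a, mod)
--         return x % mod
--
--     results = []
--     for i, (N, L) in enumerate(test_cases, start=1):
--         max_p = max([((reduce(mul, x) % mod) * modinv(sum(x))) % mod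
--                      for y in range(2, 18)
--                      for x in combinations(L, y)])
--         results.append((i, max_p))
--
--     return results
-- ===== SOURCE B (Python) =====
-- def max_p_mod(test_cases, mod=1000000007):
--     # iterative extended Euclid (same Bezout coefficient as the recursive one)
--     def modinv(a):
--         old_r, r = mod, a
--         old_t, t = 0, 1
--         while r != 0:
--             q = old_r // r
--             old_r, r = r, old_r - q * r
--             old_t, t = t, old_t - q * t
--         return old_t % mod
--
--     results = []
--     i = 0
--     for N, L in test_cases:
--         i += 1
--         # one pass over L building (product, sum, size) for every subset of size <= 17,
--         # then a running max over the qualifying subsets (no itertools, no value list)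
--         states = [(1, 0, 0)]
--         for a in L:
--             states += [(p * a, s + a, c + 1) for (p, s, c) in states if c < 17]
--         best = None
--         for p, s, c in states:
--             if 2 <= c <= 17:
--                 v = ((p % mod) * modinv(s)) % mod
--                 if best is None or v > best:
--                     best = v
--         results.append((i, best))
--     return results
-- ===== Notes on version B (the rewrite author's own statement) =====
-- stated objective: alternative
-- what changed: B replaces the per-size itertools.combinations enumeration plus recursive extended-Euclid helper by a single incremental power-set scan that keeps one (product, sum, size) triple per subset of size <= 17 and a running maximum, with an iterative extended-Euclid loop for the modular inverse (no recursion, no intermediate value list).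
import Mathlib
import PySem

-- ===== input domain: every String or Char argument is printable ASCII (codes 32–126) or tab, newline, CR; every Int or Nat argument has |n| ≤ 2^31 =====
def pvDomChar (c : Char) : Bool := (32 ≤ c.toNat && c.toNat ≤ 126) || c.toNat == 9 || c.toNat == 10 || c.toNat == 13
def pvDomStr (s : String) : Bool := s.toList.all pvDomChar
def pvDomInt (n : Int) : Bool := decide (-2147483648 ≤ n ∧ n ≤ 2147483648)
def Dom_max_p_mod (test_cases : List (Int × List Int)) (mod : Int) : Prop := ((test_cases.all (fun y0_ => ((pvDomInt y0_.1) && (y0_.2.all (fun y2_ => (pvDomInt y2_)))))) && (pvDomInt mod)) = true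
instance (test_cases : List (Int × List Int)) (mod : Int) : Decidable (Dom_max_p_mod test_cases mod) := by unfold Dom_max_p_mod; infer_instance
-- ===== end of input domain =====

-- B replaces A's per-size itertools.combinations enumeration and recursive extended Euclid by a single
-- power-set scan maintaining (product, sum, size) triples plus an iterative Euclid loop and a running max
-- (objective: alternative structure, same exact values).

-- used by both ports' termination proofs
theorem pvMod_natAbs_lt (b a : Int) (h : a ≠ 0) : (PySem.Int.mod b a).natAbs < a.natAbs := by
  rcases lt_or_gt_of_ne h with hn | hp
  · have h1 := PySem.Int.mod_neg_bounds (a := b) hn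
    omega
  · have h1 := PySem.Int.mod_nonneg (a := b) hp
    have h2 := PySem.Int.mod_lt (a := b) hp
    omega

-- ===== PORT A =====
def pvEgcd (a b : Int) : Int × Int × Int :=
  if h : a = 0 then (b, 0, 1)
  else
    match pvEgcd (PySem.Int.mod b a) a with
    | (g, y, x) => (g, x - (PySem.Int.floordiv b a) * y, y)
termination_by a.natAbs
decreasing_by exact pvMod_natAbs_lt b a h

def pvModinvA (mod a : Int) : Int := PySem.Int.mod (pvEgcd a mod).2.1 mod

-- reduce(mul, x); the [] case is unreachable in A (combinations of size ≥ 2)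
def pvReduceMul : List Int → Int
  | [] => 1
  | h :: t => t.foldl (· * ·) h

def pvValsA (mod : Int) (L : List Int) : List Int :=
  (PySem.List.pyRange 2 18 1).flatMap (fun y =>
    (PySem.List.combinations L y.toNat).map (fun x =>
      PySem.Int.mod (PySem.Int.mod (pvReduceMul x) mod * pvModinvA mod (x.foldl (· + ·) 0)) mod))

def pvLoopA (mod : Int) : Int → List (Int × List Int) → List (Int × Int)
  | _, [] => []
  | i, (_, L) :: rest =>
      (i, (PySem.List.max? (pvValsA mod L) (fun v => v)).getD 0) :: pvLoopA mod (i + 1) rest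

def max_p_mod (test_cases : List (Int × List Int)) (mod : Int) : List (Int × Int) :=
  pvLoopA mod 1 test_cases

-- ===== PORT B =====
def pvEgcdLoop (old_r r old_t t : Int) : Int × Int :=
  if h : r = 0 then (old_r, old_t)
  else
    pvEgcdLoop r (old_r - PySem.Int.floordiv old_r r * r) t (old_t - PySem.Int.floordiv old_r r * t)
termination_by r.natAbs
decreasing_by
  have h1 := PySem.Int.floordiv_mul_add_mod old_r r
  have h2 := pvMod_natAbs_lt old_r r h
  omega

def pvModinvB (a mod : Int) : Int := PySem.Int.mod (pvEgcdLoop mod a 0 1).2 mod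

def pvExt (sts : List (Int × Int × Int)) (a : Int) : List (Int × Int × Int) :=
  sts ++ sts.filterMap (fun q => if q.2.2 < 17 then some (q.1 * a, q.2.1 + a, q.2.2 + 1) else none)

def pvStates (L : List Int) : List (Int × Int × Int) := L.foldl pvExt [(1, 0, 0)]

def pvBestStep (mod : Int) (best : Option Int) (q : Int × Int × Int) : Option Int :=
  if 2 ≤ q.2.2 ∧ q.2.2 ≤ 17 then
    let v := PySem.Int.mod (PySem.Int.mod q.1 mod * pvModinvB q.2.1 mod) mod
    match best with
    | none => some v
    | some b => if b < v then some v else some b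
  else best

def pvLoopB (mod : Int) : Int → List (Int × List Int) → List (Int × Int)
  | _, [] => []
  | i, (_, L) :: rest =>
      (i, ((pvStates L).foldl (pvBestStep mod) none).getD 0) :: pvLoopB mod (i + 1) rest

def max_p_mod_alt (test_cases : List (Int × List Int)) (mod : Int) : List (Int × Int) :=
  pvLoopB mod 1 test_cases

-- ===== PRECONDITION & SPEC =====
-- A raises on mod = 0 with a nonempty test list (ZeroDivisionError in '% mod') and on any test
-- case whose list has fewer than 2 elements (max() of an empty comprehension); Pre_ excludes exactly those inputs.
def Pre_max_p_mod (test_cases : List (Int × List Int)) (mod : Int) : Prop :=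
  (test_cases = [] ∨ mod ≠ 0) ∧ ∀ q ∈ test_cases, 2 ≤ q.2.length
instance (test_cases : List (Int × List Int)) (mod : Int) : Decidable (Pre_max_p_mod test_cases mod) := by unfold Pre_max_p_mod; infer_instance

def pvWitness_max_p_mod : (List (Int × List Int)) × Int := ([(2, [1, 2])], 7)

def Spec_max_p_mod (test_cases : List (Int × List Int)) (mod : Int) (out : List (Int × Int)) : Prop := out = max_p_mod_alt test_cases mod
instance (test_cases : List (Int × List Int)) (mod : Int) (out : List (Int × Int)) : Decidable (Spec_max_p_mod test_cases mod out) := by unfold Spec_max_p_mod; infer_instance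

-- ===== CLAIM (what is proved, stated in full; the proofs are below) =====
def Claim_equal_max_p_mod : Prop := ∀ (test_cases : List (Int × List Int)) (mod : Int), Dom_max_p_mod test_cases mod → Pre_max_p_mod test_cases mod → Spec_max_p_mod test_cases mod (max_p_mod test_cases mod)

-- ===== LEMMAS AND PROOFS =====

-- the common value of one subset, written with B's modinv
def pvVal (mod p s : Int) : Int :=
  PySem.Int.mod (PySem.Int.mod p mod * pvModinvB s mod) mod

-- B's iterative Euclid loop computes exactly the Bezout data of A's recursive egcd
theorem pvEgcdLoop_eq (a b s t : Int) :
    pvEgcdLoop b a s t = ((pvEgcd a b).1, s * (pvEgcd a b).2.2 + t * (pvEgcd a b).2.1) := by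
  by_cases h : a = 0
  · subst h
    rw [pvEgcdLoop, pvEgcd]
    simp
  · have hm : b - PySem.Int.floordiv b a * a = PySem.Int.mod b a := by
      have := PySem.Int.floordiv_mul_add_mod b a
      linarith
    rcases hE : pvEgcd (PySem.Int.mod b a) a with ⟨g, y, x⟩
    rw [pvEgcdLoop, pvEgcd, dif_neg h, dif_neg h, hm,
      pvEgcdLoop_eq (PySem.Int.mod b a) a t (s - PySem.Int.floordiv b a * t), hE]
    simp only [Prod.mk.injEq, true_and]
    ring
termination_by a.natAbs
decreasing_by exact pvMod_natAbs_lt b a h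

theorem pvModinv_eq (mod a : Int) : pvModinvA mod a = pvModinvB a mod := by
  unfold pvModinvA pvModinvB
  rw [pvEgcdLoop_eq a mod 0 1]
  simp

theorem foldl_mul_eq (t : List Int) : ∀ init : Int, t.foldl (· * ·) init = init * t.prod := by
  induction t with
  | nil => intro init; simp
  | cons h t ih => intro init; simp [List.foldl_cons, ih, List.prod_cons]; ring

theorem foldl_add_eq (t : List Int) : ∀ init : Int, t.foldl (· + ·) init = init + t.sum := by
  induction t with
  | nil => intro init; simp
  | cons h t ih => intro init; simp [List.foldl_cons, ih, List.sum_cons]; ring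

theorem pvReduceMul_eq (x : List Int) : pvReduceMul x = x.prod := by
  cases x with
  | nil => rfl
  | cons h t => simp [pvReduceMul, foldl_mul_eq, List.prod_cons]

theorem pvFoldlAdd_eq (x : List Int) : x.foldl (· + ·) 0 = x.sum := by
  simp [foldl_add_eq]

theorem mem_pvValsA (mod : Int) (L : List Int) (v : Int) :
    v ∈ pvValsA mod L ↔
      ∃ c : List Int, c.Sublist L ∧ 2 ≤ c.length ∧ c.length ≤ 17 ∧ v = pvVal mod c.prod c.sum := by
  have hr : PySem.List.pyRange 2 18 1 = [2, 3, 4, 5, 6, 7, 8, 9, 10, 11, 12, 13, 14, 15, 16, 17] := by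
    decide
  unfold pvValsA
  rw [hr]
  simp only [List.mem_flatMap, List.mem_map]
  constructor
  · rintro ⟨y, hy, x, hx, rfl⟩
    obtain ⟨hsub, hlen⟩ := (PySem.List.mem_combinations_iff L y.toNat x).1 hx
    have hy' : 2 ≤ y ∧ y ≤ 17 := by
      simp only [List.mem_cons, List.not_mem_nil, or_false] at hy
      omega
    refine ⟨x, hsub, by omega, by omega, ?_⟩
    rw [pvReduceMul_eq, pvFoldlAdd_eq, pvModinv_eq, pvVal]
  · rintro ⟨c, hsub, h2, h17, rfl⟩
    refine ⟨(c.length : Int), ?_, c, ?_, ?_⟩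
    · simp only [List.mem_cons, List.not_mem_nil, or_false]
      omega
    · exact (PySem.List.mem_combinations_iff L _ c).2 ⟨hsub, by simp⟩
    · rw [pvReduceMul_eq, pvFoldlAdd_eq, pvModinv_eq, pvVal]

theorem mem_pvExt (S : List (Int × Int × Int)) (a : Int) (m : Int × Int × Int) :
    m ∈ pvExt S a ↔ m ∈ S ∨ ∃ q ∈ S, q.2.2 < 17 ∧ m = (q.1 * a, q.2.1 + a, q.2.2 + 1) := by
  simp only [pvExt, List.mem_append, List.mem_filterMap]
  constructor
  · rintro (h | ⟨q, hq, hsome⟩)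
    · exact Or.inl h
    · split at hsome
      · cases hsome
        exact Or.inr ⟨q, hq, by assumption, rfl⟩
      · cases hsome
  · rintro (h | ⟨q, hq, hlt, rfl⟩)
    · exact Or.inl h
    · exact Or.inr ⟨q, hq, by rw [if_pos hlt]⟩

theorem mem_foldl_pvExt (xs : List Int) (S : List (Int × Int × Int)) (m : Int × Int × Int) :
    m ∈ xs.foldl pvExt S ↔
      ∃ q ∈ S, ∃ sub : List Int, sub.Sublist xs ∧ (sub ≠ [] → q.2.2 + (sub.length : Int) ≤ 17) ∧
        m = (q.1 * sub.prod, q.2.1 + sub.sum, q.2.2 + (sub.length : Int)) := by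
  induction xs generalizing S with
  | nil =>
      simp only [List.foldl_nil, List.sublist_nil]
      constructor
      · intro hm
        exact ⟨m, hm, [], rfl, by simp, by simp⟩
      · rintro ⟨q, hq, sub, rfl, -, rfl⟩
        simpa using hq
  | cons a xs ih =>
      rw [List.foldl_cons, ih]
      constructor
      · rintro ⟨q', hq', sub, hsub, hcond, rfl⟩
        rcases (mem_pvExt S a q').1 hq' with hq | ⟨q, hq, hlt, rfl⟩
        · exact ⟨q', hq, sub, hsub.cons a, hcond, rfl⟩
        · dsimp only at hcond
          refine ⟨q, hq, a :: sub, List.cons_sublist_cons.2 hsub, ?_, ?_⟩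
          · intro _hne0
            by_cases hne : sub = []
            · subst hne
              simp only [List.length_cons, List.length_nil]
              push_cast
              omega
            · have h2 := hcond hne
              simp only [List.length_cons] at h2 ⊢
              push_cast at h2 ⊢
              omega
          · dsimp only
            simp only [List.prod_cons, List.sum_cons, List.length_cons, Prod.mk.injEq]
            refine ⟨by ring, by ring, by push_cast; ring⟩
      · rintro ⟨q, hq, sub, hsub, hcond, rfl⟩
        rcases List.sublist_cons_iff.1 hsub with hs | ⟨tl, rfl, htl⟩
        · exact ⟨q, (mem_pvExt S a q).2 (Or.inl hq), sub, hs, hcond, rfl⟩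
        · have hlt : q.2.2 < 17 := by
            have := hcond (by simp)
            simp only [List.length_cons] at this
            push_cast at this
            omega
          refine ⟨(q.1 * a, q.2.1 + a, q.2.2 + 1),
            (mem_pvExt S a _).2 (Or.inr ⟨q, hq, hlt, rfl⟩), tl, htl, ?_, ?_⟩
          · intro hne
            have h2 := hcond (by simp)
            dsimp only
            simp only [List.length_cons] at h2 ⊢
            push_cast at h2 ⊢
            omega
          · dsimp only
            simp only [List.prod_cons, List.sum_cons, List.length_cons, Prod.mk.injEq]
            refine ⟨by ring, by ring, by push_cast; ring⟩

def pvQualVals (mod : Int) (sts : List (Int × Int × Int)) : List Int :=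
  sts.filterMap (fun q => if 2 ≤ q.2.2 ∧ q.2.2 ≤ 17 then some (pvVal mod q.1 q.2.1) else none)

def pvOmax (b : Option Int) (v : Int) : Option Int :=
  match b with
  | none => some v
  | some b' => if b' < v then some v else some b'

theorem pvBest_eq_omax (mod : Int) (sts : List (Int × Int × Int)) (acc : Option Int) :
    sts.foldl (pvBestStep mod) acc = (pvQualVals mod sts).foldl pvOmax acc := by
  induction sts generalizing acc with
  | nil => rfl
  | cons q rest ih =>
      simp only [List.foldl_cons, pvQualVals, List.filterMap_cons]
      by_cases hg : 2 ≤ q.2.2 ∧ q.2.2 ≤ 17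
      · rw [if_pos hg]
        simp only [List.foldl_cons]
        rw [ih]
        congr 1
        simp [pvBestStep, if_pos hg, pvOmax, pvVal]
      · rw [if_neg hg]
        rw [ih]
        congr 1
        simp [pvBestStep, if_neg hg]
  
theorem pvOmax_none (vs : List Int) (acc : Option Int) :
    vs.foldl pvOmax acc = none ↔ (acc = none ∧ vs = []) := by
  induction vs generalizing acc with
  | nil => simp
  | cons v rest ih =>
      simp only [List.foldl_cons, ih]
      constructor
      · rintro ⟨h1, -⟩
        cases acc with
        | none => simp [pvOmax] at h1
        | some b => simp [pvOmax] at h1; split at h1 <;> simp_all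
      · rintro ⟨-, h⟩
        exact absurd h (by simp)

theorem pvOmax_some (vs : List Int) (acc : Option Int) (w : Int)
    (h : vs.foldl pvOmax acc = some w) :
    (w ∈ vs ∨ acc = some w) ∧ (∀ v ∈ vs, v ≤ w) ∧ (∀ u, acc = some u → u ≤ w) := by
  induction vs generalizing acc with
  | nil => simp at h; simp [h]
  | cons v rest ih =>
      simp only [List.foldl_cons] at h
      obtain ⟨h1, h2, h3⟩ := ih (pvOmax acc v) h
      have hstep : ∃ u', pvOmax acc v = some u' ∧ v ≤ u' ∧ (∀ b, acc = some b → b ≤ u') := by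
        cases acc with
        | none => exact ⟨v, rfl, le_refl v, by intro b hb; cases hb⟩
        | some b =>
            by_cases hbv : b < v
            · exact ⟨v, by simp [pvOmax, hbv], le_refl v, by intro b' hb'; cases hb'; omega⟩
            · exact ⟨b, by simp [pvOmax, hbv], by omega, by intro b' hb'; cases hb'; omega⟩
      obtain ⟨u', hu', hvu, hacc⟩ := hstep
      have huw : u' ≤ w := h3 u' hu'
      refine ⟨?_, ?_, ?_⟩
      · rcases h1 with hw | hw
        · exact Or.inl (List.mem_cons_of_mem _ hw)
        · rw [hu'] at hw
          cases hw
          cases acc with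
          | none => simp [pvOmax] at hu'; simp [hu']
          | some b =>
              simp only [pvOmax] at hu'
              split at hu' <;> simp_all
      · intro u hu
        rcases List.mem_cons.1 hu with rfl | hu
        · omega
        · exact h2 u hu
      · intro u hu
        subst hu
        have := hacc u rfl
        omega

theorem mem_pvQualVals (mod : Int) (L : List Int) (v : Int) :
    v ∈ pvQualVals mod (pvStates L) ↔
      ∃ c : List Int, c.Sublist L ∧ 2 ≤ c.length ∧ c.length ≤ 17 ∧ v = pvVal mod c.prod c.sum := by
  unfold pvQualVals pvStates
  simp only [List.mem_filterMap]
  constructor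
  · rintro ⟨q, hq, hsome⟩
    split at hsome
    case isFalse => cases hsome
    case isTrue hguard =>
    cases hsome
    obtain ⟨q0, hq0, sub, hsub, hcond, rfl⟩ := (mem_foldl_pvExt L [(1, 0, 0)] q).1 hq
    simp only [List.mem_singleton] at hq0
    subst hq0
    dsimp only at hguard ⊢
    refine ⟨sub, hsub, by omega, by omega, by simp⟩
  · rintro ⟨c, hsub, h2, h17, rfl⟩
    refine ⟨(c.prod, c.sum, (c.length : Int)), ?_, ?_⟩
    · refine (mem_foldl_pvExt L [(1, 0, 0)] _).2 ⟨(1, 0, 0), by simp, c, hsub, ?_, by simp⟩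
      intro _
      dsimp only
      omega
    · dsimp only
      rw [if_pos (by omega)]

theorem pvBest_eq (mod : Int) (L : List Int) :
    ((pvStates L).foldl (pvBestStep mod) none).getD 0
      = (PySem.List.max? (pvValsA mod L) (fun v => v)).getD 0 := by
  rw [pvBest_eq_omax]
  have hmem : ∀ v : Int, v ∈ pvQualVals mod (pvStates L) ↔ v ∈ pvValsA mod L := by
    intro v
    rw [mem_pvQualVals, mem_pvValsA]
  cases hA : PySem.List.max? (pvValsA mod L) (fun v => v) with
  | none =>
      have hAe : pvValsA mod L = [] := (PySem.List.max?_eq_none_iff _ _).1 hA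
      have hq : pvQualVals mod (pvStates L) = [] := by
        cases hq : pvQualVals mod (pvStates L) with
        | nil => rfl
        | cons x t =>
            have hx : x ∈ pvValsA mod L := (hmem x).1 (by rw [hq]; exact List.mem_cons_self)
            rw [hAe] at hx
            cases hx
      rw [hq]
      rfl
  | some m =>
      have hmA : m ∈ pvValsA mod L := PySem.List.max?_mem hA
      have hmax : ∀ y ∈ pvValsA mod L, y ≤ m := PySem.List.max?_isMax hA
      cases hB : (pvQualVals mod (pvStates L)).foldl pvOmax none with
      | none =>
          have := ((pvOmax_none _ _).1 hB).2
          have : m ∈ pvQualVals mod (pvStates L) := (hmem m).2 hmA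
          simp_all
      | some w =>
          obtain ⟨hw1, hw2, -⟩ := pvOmax_some _ _ _ hB
          rcases hw1 with hw1 | hw1
          · have hwm : w ≤ m := hmax w ((hmem w).1 hw1)
            have hmw : m ≤ w := hw2 m ((hmem m).2 hmA)
            simp [le_antisymm hwm hmw]
          · cases hw1

theorem pvLoop_eq (mod : Int) (tcs : List (Int × List Int)) (i : Int) :
    pvLoopA mod i tcs = pvLoopB mod i tcs := by
  induction tcs generalizing i with
  | nil => rfl
  | cons q rest ih =>
      obtain ⟨N, L⟩ := q
      simp only [pvLoopA, pvLoopB, ih, pvBest_eq]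

-- ===== VERDICT (by name: the statement is the Claim_ definition above) =====
theorem max_p_mod_spec : Claim_equal_max_p_mod := by
  intro tcs mod _ _
  unfold Spec_max_p_mod max_p_mod max_p_mod_alt
  exact pvLoop_eq mod tcs 1
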